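-- pv_equiv track=rewrite | github.com/j1mmyson/PS | python/baekjoon/SILVER/S3_1874_스택수열.py | check
-- ===== SOURCE A (Python) =====
-- def check(l):
--     maxValue = l[0]
--
--     for i in range(len(l)-1):
--         if l[i] < l[i+1]:
--             if maxValue > l[i+1]:
--                 return False
--             else:
--                 maxValue = l[i+1]
--     return True
-- ===== SOURCE B (Python) =====
-- def check(l):
--     first = l[0]
--     peaks = [b for a, b in zip(l, l[1:]) if a < b]
--     seq = [first] + peaks
--     return all(a <= b for a, b in zip(seq, seq[1:]))
-- ===== Notes on version B (the rewrite author's own statement) =====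
-- stated objective: alternative
-- what changed: Replaces A's single fused index-loop with early return and a running maximum by two passes: collect the targets of strictly ascending steps (peaks) via zip of adjacent pairs, then check that [l[0]] + peaks is non-decreasing.
-- outside the precondition, e.g. on check([]): A raises IndexError, B raises IndexError
import Mathlib
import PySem

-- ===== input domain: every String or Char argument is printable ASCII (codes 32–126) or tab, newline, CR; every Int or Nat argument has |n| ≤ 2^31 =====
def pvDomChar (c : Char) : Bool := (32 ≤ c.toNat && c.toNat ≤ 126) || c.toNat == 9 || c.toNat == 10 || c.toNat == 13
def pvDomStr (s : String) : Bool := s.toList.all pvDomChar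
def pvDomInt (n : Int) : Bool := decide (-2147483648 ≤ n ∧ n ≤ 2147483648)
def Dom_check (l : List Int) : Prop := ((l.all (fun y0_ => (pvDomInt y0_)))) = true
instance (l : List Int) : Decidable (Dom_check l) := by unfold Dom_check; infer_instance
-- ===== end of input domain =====

-- B replaces A's fused early-return scan with two passes (collect ascent targets, then a
-- monotonicity check); equivalence of the RETURN value on non-empty lists is proved below.

-- ===== PORT A =====
-- the for-loop over range(len(l)-1) with early return, as an index recursion over the same state
def checkLoop (l : List Int) (maxValue : Int) (i : Nat) : Bool :=
  if h : i < l.length - 1 then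
    if l.getD i 0 < l.getD (i+1) 0 then
      if maxValue > l.getD (i+1) 0 then false
      else checkLoop l (l.getD (i+1) 0) (i+1)
    else checkLoop l maxValue (i+1)
  else true
termination_by l.length - i
decreasing_by all_goals omega

def check (l : List Int) : Bool := checkLoop l l.headI 0

-- ===== PORT B =====
def check_alt (l : List Int) : Bool :=
  let first := l.headI  -- l[0]; Pre_check guarantees l ≠ []
  let peaks := (l.zip (l.drop 1)).filterMap (fun p => if p.1 < p.2 then some p.2 else none)
  let seq := first :: peaks
  (seq.zip (seq.drop 1)).all (fun p => decide (p.1 ≤ p.2))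

-- ===== PRECONDITION & SPEC =====
-- Pre_ excludes only the empty list, on which A raises IndexError at l[0] (B raises there too).
def Pre_check (l : List Int) : Prop := l ≠ []
instance (l : List Int) : Decidable (Pre_check l) := by unfold Pre_check; infer_instance
def pvWitness_check : List Int := [1, 2]
def Spec_check (l : List Int) (out : Bool) : Prop := out = check_alt l
instance (l : List Int) (out : Bool) : Decidable (Spec_check l out) := by unfold Spec_check; infer_instance

-- ===== CLAIM (what is proved, stated in full; the proofs are below) =====
def Claim_equal_check : Prop := ∀ (l : List Int), Dom_check l → Pre_check l → Spec_check l (check l)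

-- ===== LEMMAS AND PROOFS =====

-- reference recursion on the list structure, matching A's loop over adjacent pairs
def auxA (m : Int) : List Int → Bool
  | x :: y :: r => if x < y then (if m > y then false else auxA y (y :: r)) else auxA m (y :: r)
  | _ => true

def peaksOf (xs : List Int) : List Int :=
  (xs.zip (xs.drop 1)).filterMap (fun p => if p.1 < p.2 then some p.2 else none)

def allPairs (seq : List Int) : Bool :=
  (seq.zip (seq.drop 1)).all (fun p => decide (p.1 ≤ p.2))

lemma peaksOf_cons (x y : Int) (r : List Int) :
    peaksOf (x :: y :: r) = (if x < y then [y] else []) ++ peaksOf (y :: r) := by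
  by_cases h : x < y <;> simp [peaksOf, h]

lemma allPairs_cons (m y : Int) (r : List Int) :
    allPairs (m :: y :: r) = (decide (m ≤ y) && allPairs (y :: r)) := by
  simp [allPairs]

lemma auxA_eq (m : Int) (xs : List Int) : auxA m xs = allPairs (m :: peaksOf xs) := by
  induction xs generalizing m with
  | nil => simp [auxA, peaksOf, allPairs]
  | cons x t ih =>
    cases t with
    | nil => simp [auxA, peaksOf, allPairs]
    | cons y r =>
      rw [auxA, peaksOf_cons]
      by_cases hxy : x < y
      · simp only [hxy, if_pos, List.singleton_append]
        rw [allPairs_cons]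
        by_cases hm : m > y
        · simp [hm, show ¬ (m ≤ y) by omega]
        · simp [hm, show m ≤ y by omega, ih y]
      · simp [hxy, ih m]

lemma checkLoop_eq_auxA (l : List Int) (m : Int) (i : Nat) :
    checkLoop l m i = auxA m (l.drop i) := by
  by_cases h : i < l.length - 1
  · have hi : i < l.length := by omega
    have hi1 : i + 1 < l.length := by omega
    have hd : l.drop i = l[i] :: l.drop (i + 1) := List.drop_eq_getElem_cons hi
    have hd1 : l.drop (i + 1) = l[i+1] :: l.drop (i + 2) := List.drop_eq_getElem_cons hi1
    have g0 : l.getD i 0 = l[i] := List.getD_eq_getElem l 0 hi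
    have g1 : l.getD (i+1) 0 = l[i+1] := List.getD_eq_getElem l 0 hi1
    rw [checkLoop, dif_pos h, g0, g1,
        checkLoop_eq_auxA l (l[i+1]) (i+1), checkLoop_eq_auxA l m (i+1),
        hd, hd1, auxA]
  · rw [checkLoop, dif_neg h]
    have : (l.drop i).length ≤ 1 := by simp; omega
    rcases hD : l.drop i with _ | ⟨a, _ | ⟨b, r⟩⟩ <;> simp_all [auxA]
termination_by l.length - i
decreasing_by all_goals omega

-- ===== VERDICT (by name: the statement is the Claim_ definition above) =====
theorem check_spec : Claim_equal_check := by
  intro l _ _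
  unfold Spec_check check check_alt
  rw [checkLoop_eq_auxA, List.drop_zero, auxA_eq]
  rfl
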